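-- pv_equiv track=rewrite | github.com/cugmartin/Advance-Udemy-Downloader | scripts/parse_course_report.py | extract_title_and_subtitle
-- ===== SOURCE A (Python) =====
-- def extract_title_and_subtitle(lines: list[str]) -> tuple[str | None, str | None]:
--     for idx, raw in enumerate(lines):
--         stripped = raw.strip()
--         if stripped.startswith("# "):
--             title = stripped[2:].strip()
--             subtitle = None
--             for candidate in lines[idx + 1 :]:
--                 nxt = candidate.strip()
--                 if not nxt:
--                     continue
--                 if nxt.startswith("#"):
--                     break
--                 subtitle = nxt
--                 break
--             return title, subtitle
--     return None, None
-- ===== SOURCE B (Python) =====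
-- def extract_title_and_subtitle(lines: list[str]) -> tuple[str | None, str | None]:
--     title = None
--     for raw in lines:
--         stripped = raw.strip()
--         if title is None:
--             if stripped.startswith("# "):
--                 title = stripped[2:].strip()
--         else:
--             if not stripped:
--                 continue
--             if stripped.startswith("#"):
--                 return title, None
--             return title, stripped
--     return title, None
-- ===== Notes on version B (the rewrite author's own statement) =====
-- stated objective: simpler
-- what changed: Replaced A's outer scan with an inner lines[idx+1:] re-scan by a single flat state-machine pass that carries the found title and decides the subtitle on the fly.
import Mathlib
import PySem

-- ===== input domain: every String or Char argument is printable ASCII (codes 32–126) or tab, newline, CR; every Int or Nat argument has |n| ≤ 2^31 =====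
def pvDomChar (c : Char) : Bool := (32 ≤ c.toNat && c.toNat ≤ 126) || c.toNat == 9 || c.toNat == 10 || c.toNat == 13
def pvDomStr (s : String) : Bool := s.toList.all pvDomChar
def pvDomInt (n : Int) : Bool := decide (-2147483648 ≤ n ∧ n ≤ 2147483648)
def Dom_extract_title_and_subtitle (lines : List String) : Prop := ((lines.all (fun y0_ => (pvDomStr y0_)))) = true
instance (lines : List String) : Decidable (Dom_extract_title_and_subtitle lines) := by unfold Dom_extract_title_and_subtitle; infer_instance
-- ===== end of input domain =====

-- B is a single flat state-machine pass carrying the found title, instead of A's outer scan plus an inner re-scan of lines[idx+1:] (objective: simpler).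

-- ===== PORT A =====
-- A's inner loop: 'for candidate in lines[idx+1:]: …' finding the subtitle
def pvInnerA : List String → Option String
  | [] => none
  | c :: rest =>
    let nxt := PySem.Str.strip c
    if nxt = "" then pvInnerA rest
    else if PySem.Str.startswith nxt "#" then none
    else some nxt

def extract_title_and_subtitle : List String → Option String × Option String
  | [] => (none, none)
  | raw :: rest =>
    let stripped := PySem.Str.strip raw
    if PySem.Str.startswith stripped "# " then
      (some (PySem.Str.strip (PySem.Str.slice stripped (some 2) none)), pvInnerA rest)
    else extract_title_and_subtitle rest

-- ===== PORT B =====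
-- B's single loop with the 'title' state
def pvAltLoop : Option String → List String → Option String × Option String
  | title, [] => (title, none)
  | none, raw :: rest =>
    let stripped := PySem.Str.strip raw
    pvAltLoop (if PySem.Str.startswith stripped "# " then
                 some (PySem.Str.strip (PySem.Str.slice stripped (some 2) none))
               else none) rest
  | some t, raw :: rest =>
    let stripped := PySem.Str.strip raw
    if stripped = "" then pvAltLoop (some t) rest
    else if PySem.Str.startswith stripped "#" then (some t, none)
    else (some t, stripped)

def extract_title_and_subtitle_alt (lines : List String) : Option String × Option String :=
  pvAltLoop none lines

-- ===== PRECONDITION & SPEC =====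
def Spec_extract_title_and_subtitle (lines : List String) (out : Option String × Option String) : Prop := out = extract_title_and_subtitle_alt lines
instance (lines : List String) (out : Option String × Option String) : Decidable (Spec_extract_title_and_subtitle lines out) := by unfold Spec_extract_title_and_subtitle; infer_instance

-- ===== CLAIM (what is proved, stated in full; the proofs are below) =====
def Claim_equal_extract_title_and_subtitle : Prop := ∀ (lines : List String), Dom_extract_title_and_subtitle lines → Spec_extract_title_and_subtitle lines (extract_title_and_subtitle lines)

-- ===== LEMMAS AND PROOFS =====
-- once the title is found, B's loop computes exactly A's inner subtitle scan
theorem pvAltLoop_some (t : String) (rest : List String) :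
    pvAltLoop (some t) rest = (some t, pvInnerA rest) := by
  induction rest with
  | nil => rfl
  | cons c cs ih =>
    simp only [pvAltLoop, pvInnerA]
    split_ifs <;> simp [ih]

theorem pvMain (lines : List String) :
    extract_title_and_subtitle lines = pvAltLoop none lines := by
  induction lines with
  | nil => rfl
  | cons raw rest ih =>
    simp only [extract_title_and_subtitle, pvAltLoop]
    split_ifs with h
    · simp [h, pvAltLoop_some]
    · simp [h, ih]

-- ===== VERDICT (by name: the statement is the Claim_ definition above) =====
theorem extract_title_and_subtitle_spec : Claim_equal_extract_title_and_subtitle := by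
  intro lines _
  show _ = _
  simpa [extract_title_and_subtitle_alt] using pvMain lines
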